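-- pv_equiv track=rewrite | github.com/GALJO/pythonBasics | olympiad_exercises/okiXV/stage1/close_tour/slo.py | convert_to_groups
-- ===== SOURCE A (Python) =====
-- def convert_to_groups(_numbers):
--     """
--     Zamienia liste liczb na grupy miliardow, milionow, tysiecy, setek
--     :param _numbers: lista liczb
--     :return: tablica grup
--     """
--     _res = []
--     _mld = 0
--     _mln = 0
--     _k = 0
--     _hund = 0
--     if len(_numbers) == 1:
--         _hund = _numbers[0]
--         _res = [_mld, _mln, _k, _hund]
--         return _res
--     _i = 0
--     for _i in range(len(_numbers)):
--         if _numbers[_i] == 1000000000: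
--             for _md in range(_i - 1, -1, -1):
--                 _mld += _numbers[_md]
--             _mld = _mld * 1000000000
--             continue
--         if _numbers[_i] == 1000000:
--             for _m in range(_i - 1, -1, -1):
--                 if _numbers[_m] == 1000000000:
--                     break
--                 _mln += _numbers[_m]
--             _mln = _mln * 1000000
--             continue
--         elif _numbers[_i] == 1000:
--             for _ki in range(_i - 1, -1, -1):
--                 if _numbers[_ki] == 1000000:
--                     break
--                 if _numbers[_ki] == 1000000000:
--                     break
--                 _k += _numbers[_ki]
--             _k = _k * 1000
--             continue
--     for _j in range(len(_numbers) - 1, -1, -1):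
--         if _numbers[_j] == 1000 or _numbers[_j] == 1000000 or _numbers[_j] == 1000000000:
--             break
--         _hund += _numbers[_j]
--     _res = [_mld, _mln, _k, _hund]
--     return _res
-- ===== SOURCE B (Python) =====
-- def convert_to_groups(_numbers):
--     """Single left-to-right pass with running prefix sums instead of nested backward rescans."""
--     if len(_numbers) == 1:
--         return [0, 0, 0, _numbers[0]]
--     mld = mln = k = 0
--     prefix = s9 = s69 = slast = 0
--     for x in _numbers:
--         if x == 1000000000:
--             mld = (mld + prefix) * 1000000000
--         elif x == 1000000:
--             mln = (mln + s9) * 1000000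
--         elif x == 1000:
--             k = (k + s69) * 1000
--         prefix += x
--         s9 = 0 if x == 1000000000 else s9 + x
--         s69 = 0 if x in (1000000000, 1000000) else s69 + x
--         slast = 0 if x in (1000000000, 1000000, 1000) else slast + x
--     return [mld, mln, k, slast]
-- ===== Notes on version B (the rewrite author's own statement) =====
-- stated objective: alternative
-- what changed: Replaced A's nested backward rescans (one inner loop per marker plus a final backward scan) by a single left-to-right pass that maintains four running sums (total prefix, sum since last 10^9 marker, sum since last 10^9/10^6 marker, sum since last marker of any kind).
import Mathlib
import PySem

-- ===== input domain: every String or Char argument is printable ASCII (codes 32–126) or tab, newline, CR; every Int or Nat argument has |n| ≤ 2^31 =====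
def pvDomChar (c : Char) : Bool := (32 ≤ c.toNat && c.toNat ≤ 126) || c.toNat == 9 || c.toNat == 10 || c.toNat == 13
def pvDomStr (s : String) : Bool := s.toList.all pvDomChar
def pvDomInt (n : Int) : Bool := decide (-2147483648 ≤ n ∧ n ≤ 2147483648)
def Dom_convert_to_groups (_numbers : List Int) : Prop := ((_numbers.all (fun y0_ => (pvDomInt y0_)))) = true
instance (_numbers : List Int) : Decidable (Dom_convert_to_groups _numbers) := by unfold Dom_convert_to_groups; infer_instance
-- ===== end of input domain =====

-- B replaces A's nested backward rescans by one left-to-right pass keeping four running sums (objective: alternative single-pass structure; not measurably faster on the benchmarked inputs).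

-- ===== PORT A =====
-- inner backward loop `for _md in range(_i-1,-1,-1): _mld += _numbers[_md]`
-- (first argument of the recursion is the exclusive upper index; indices are always in range, so getD 0 is exact)
def aMld (nums : List Int) : Nat → Int → Int
  | 0, acc => acc
  | m + 1, acc => aMld nums m (acc + nums.getD m 0)

-- inner backward loop of the million branch (breaks at 1000000000)
def aMln (nums : List Int) : Nat → Int → Int
  | 0, acc => acc
  | m + 1, acc =>
    if nums.getD m 0 = 1000000000 then acc
    else aMln nums m (acc + nums.getD m 0)

-- inner backward loop of the thousand branch (breaks at 1000000, then at 1000000000)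
def aK (nums : List Int) : Nat → Int → Int
  | 0, acc => acc
  | m + 1, acc =>
    if nums.getD m 0 = 1000000 then acc
    else if nums.getD m 0 = 1000000000 then acc
    else aK nums m (acc + nums.getD m 0)

-- the final backward loop computing _hund (breaks at any marker)
def aHund (nums : List Int) : Nat → Int → Int
  | 0, acc => acc
  | m + 1, acc =>
    if nums.getD m 0 = 1000 ∨ nums.getD m 0 = 1000000 ∨ nums.getD m 0 = 1000000000 then acc
    else aHund nums m (acc + nums.getD m 0)

-- one iteration of the outer `for _i in range(len(_numbers))` loop; state (_mld, _mln, _k)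
def aStep (nums : List Int) (st : Int × Int × Int) (i : Nat) : Int × Int × Int :=
  let x := nums.getD i 0
  if x = 1000000000 then (aMld nums i st.1 * 1000000000, st.2.1, st.2.2)
  else if x = 1000000 then (st.1, aMln nums i st.2.1 * 1000000, st.2.2)
  else if x = 1000 then (st.1, st.2.1, aK nums i st.2.2 * 1000)
  else st

def convert_to_groups (_numbers : List Int) : List Int :=
  if _numbers.length = 1 then [0, 0, 0, _numbers.getD 0 0]
  else
    let st := (List.range _numbers.length).foldl (aStep _numbers) (0, 0, 0)
    [st.1, st.2.1, st.2.2, aHund _numbers _numbers.length 0]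

-- ===== PORT B =====
-- one iteration of B's single pass; state (mld, mln, k, prefix, s9, s69, slast)
def bStep (st : Int × Int × Int × Int × Int × Int × Int) (x : Int) :
    Int × Int × Int × Int × Int × Int × Int :=
  let mld := if x = 1000000000 then (st.1 + st.2.2.2.1) * 1000000000 else st.1
  let mln := if x = 1000000 then (st.2.1 + st.2.2.2.2.1) * 1000000 else st.2.1
  let k := if x = 1000 then (st.2.2.1 + st.2.2.2.2.2.1) * 1000 else st.2.2.1
  (mld, mln, k,
   st.2.2.2.1 + x,
   if x = 1000000000 then 0 else st.2.2.2.2.1 + x,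
   if x = 1000000000 ∨ x = 1000000 then 0 else st.2.2.2.2.2.1 + x,
   if x = 1000000000 ∨ x = 1000000 ∨ x = 1000 then 0 else st.2.2.2.2.2.2 + x)

def convert_to_groups_alt (_numbers : List Int) : List Int :=
  if _numbers.length = 1 then [0, 0, 0, _numbers.getD 0 0]
  else
    let st := _numbers.foldl bStep (0, 0, 0, 0, 0, 0, 0)
    [st.1, st.2.1, st.2.2.1, st.2.2.2.2.2.2]

-- ===== PRECONDITION & SPEC =====
def Spec_convert_to_groups (_numbers : List Int) (out : List Int) : Prop := out = convert_to_groups_alt _numbers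
instance (_numbers : List Int) (out : List Int) : Decidable (Spec_convert_to_groups _numbers out) := by unfold Spec_convert_to_groups; infer_instance

-- ===== CLAIM (what is proved, stated in full; the proofs are below) =====
def Claim_equal_convert_to_groups : Prop := ∀ (_numbers : List Int), Dom_convert_to_groups _numbers → Spec_convert_to_groups _numbers (convert_to_groups _numbers)

-- ===== LEMMAS AND PROOFS =====

-- linearity of the backward loops in their accumulator
theorem aMld_lin (nums : List Int) (m : Nat) (acc : Int) :
    aMld nums m acc = acc + aMld nums m 0 := by
  induction m generalizing acc with
  | zero => simp [aMld]
  | succ m ih =>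
    simp only [aMld]
    rw [ih, ih (0 + nums.getD m 0)]; ring

theorem aMln_lin (nums : List Int) (m : Nat) (acc : Int) :
    aMln nums m acc = acc + aMln nums m 0 := by
  induction m generalizing acc with
  | zero => simp [aMln]
  | succ m ih =>
    simp only [aMln]
    split
    · ring
    · rw [ih, ih (0 + nums.getD m 0)]; ring

theorem aK_lin (nums : List Int) (m : Nat) (acc : Int) :
    aK nums m acc = acc + aK nums m 0 := by
  induction m generalizing acc with
  | zero => simp [aK]
  | succ m ih =>
    simp only [aK]
    split
    · ring
    · split
      · ring
      · rw [ih, ih (0 + nums.getD m 0)]; ring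

theorem aHund_lin (nums : List Int) (m : Nat) (acc : Int) :
    aHund nums m acc = acc + aHund nums m 0 := by
  induction m generalizing acc with
  | zero => simp [aHund]
  | succ m ih =>
    simp only [aHund]
    split
    · ring
    · rw [ih, ih (0 + nums.getD m 0)]; ring

-- the backward loops only read indices below their bound, so appending is invisible
theorem getD_append_lt (xs : List Int) (x : Int) (m : Nat) (h : m < xs.length) :
    (xs ++ [x]).getD m 0 = xs.getD m 0 := by
  simp [List.getD, List.getElem?_append_left h]

theorem aMld_append (xs : List Int) (x : Int) (m : Nat) (h : m ≤ xs.length) (acc : Int) :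
    aMld (xs ++ [x]) m acc = aMld xs m acc := by
  induction m generalizing acc with
  | zero => rfl
  | succ m ih =>
    have hm : m < xs.length := h
    simp only [aMld, getD_append_lt xs x m hm]
    exact ih (Nat.le_of_lt hm) _

theorem aMln_append (xs : List Int) (x : Int) (m : Nat) (h : m ≤ xs.length) (acc : Int) :
    aMln (xs ++ [x]) m acc = aMln xs m acc := by
  induction m generalizing acc with
  | zero => rfl
  | succ m ih =>
    have hm : m < xs.length := h
    simp only [aMln, getD_append_lt xs x m hm]
    split
    · rfl
    · exact ih (Nat.le_of_lt hm) _

theorem aK_append (xs : List Int) (x : Int) (m : Nat) (h : m ≤ xs.length) (acc : Int) :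
    aK (xs ++ [x]) m acc = aK xs m acc := by
  induction m generalizing acc with
  | zero => rfl
  | succ m ih =>
    have hm : m < xs.length := h
    simp only [aK, getD_append_lt xs x m hm]
    split
    · rfl
    · split
      · rfl
      · exact ih (Nat.le_of_lt hm) _

theorem aHund_append (xs : List Int) (x : Int) (m : Nat) (h : m ≤ xs.length) (acc : Int) :
    aHund (xs ++ [x]) m acc = aHund xs m acc := by
  induction m generalizing acc with
  | zero => rfl
  | succ m ih =>
    have hm : m < xs.length := h
    simp only [aHund, getD_append_lt xs x m hm]
    split
    · rfl
    · exact ih (Nat.le_of_lt hm) _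

theorem aStep_append (xs : List Int) (x : Int) (i : Nat) (h : i < xs.length) (st : Int × Int × Int) :
    aStep (xs ++ [x]) st i = aStep xs st i := by
  simp only [aStep, getD_append_lt xs x i h,
    aMld_append xs x i (Nat.le_of_lt h), aMln_append xs x i (Nat.le_of_lt h),
    aK_append xs x i (Nat.le_of_lt h)]

theorem getD_append_len (xs : List Int) (x : Int) :
    (xs ++ [x]).getD xs.length 0 = x := by
  simp [List.getD]

-- B's step function, spelled out component-wise
theorem bStep_eq (mld mln k p s9 s69 sl x : Int) :
    bStep (mld, mln, k, p, s9, s69, sl) x =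
      (if x = 1000000000 then (mld + p) * 1000000000 else mld,
       if x = 1000000 then (mln + s9) * 1000000 else mln,
       if x = 1000 then (k + s69) * 1000 else k,
       p + x,
       if x = 1000000000 then 0 else s9 + x,
       if x = 1000000000 ∨ x = 1000000 then 0 else s69 + x,
       if x = 1000000000 ∨ x = 1000000 ∨ x = 1000 then 0 else sl + x) := rfl

-- the main invariant: B's single-pass state, component by component, in terms of A's loops
theorem main_inv (nums : List Int) :
    nums.foldl bStep (0, 0, 0, 0, 0, 0, 0) =
      (((List.range nums.length).foldl (aStep nums) (0, 0, 0)).1,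
       ((List.range nums.length).foldl (aStep nums) (0, 0, 0)).2.1,
       ((List.range nums.length).foldl (aStep nums) (0, 0, 0)).2.2,
       aMld nums nums.length 0,
       aMln nums nums.length 0,
       aK nums nums.length 0,
       aHund nums nums.length 0) := by
  induction nums using List.reverseRecOn with
  | nil => rfl
  | append_singleton xs x ih =>
    have hlen : (xs ++ [x]).length = xs.length + 1 := by simp
    have hfold :
        (List.range (xs ++ [x]).length).foldl (aStep (xs ++ [x])) (0, 0, 0) =
          aStep (xs ++ [x]) ((List.range xs.length).foldl (aStep xs) (0, 0, 0)) xs.length := by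
      rw [hlen, List.range_succ, List.foldl_append]
      simp only [List.foldl_cons, List.foldl_nil]
      congr 1
      apply List.foldl_ext
      intro st i hi
      exact aStep_append xs x i (List.mem_range.mp hi) st
    set stA := (List.range xs.length).foldl (aStep xs) (0, 0, 0) with hstA
    rw [List.foldl_append, ih, hfold]
    have hg := getD_append_len xs x
    simp only [hlen]
    simp only [List.foldl_cons, List.foldl_nil, aStep, aMld, aMln, aK, aHund, hg,
      aMld_append xs x xs.length le_rfl, aMln_append xs x xs.length le_rfl,
      aK_append xs x xs.length le_rfl, aHund_append xs x xs.length le_rfl,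
      bStep_eq, Prod.mk.injEq]
    have t1 := aMld_lin xs xs.length stA.1
    have t2 := aMln_lin xs xs.length stA.2.1
    have t3 := aK_lin xs xs.length stA.2.2
    have t4 := aMld_lin xs xs.length x
    have t5 := aMln_lin xs xs.length x
    have t6 := aK_lin xs xs.length x
    have t7 := aHund_lin xs xs.length x
    by_cases h9 : x = 1000000000
    · simp only [h9] at t1 t2 t3 t4 t5 t6 t7 ⊢
      norm_num
      and_intros <;> first
        | rfl
        | linarith [t1, t2, t3, t4, t5, t6, t7]
    · by_cases h6 : x = 1000000
      · simp only [h6] at t1 t2 t3 t4 t5 t6 t7 ⊢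
        norm_num
        and_intros <;> first
          | rfl
          | linarith [t1, t2, t3, t4, t5, t6, t7]
      · by_cases h3 : x = 1000
        · simp only [h3] at t1 t2 t3 t4 t5 t6 t7 ⊢
          norm_num
          and_intros <;> first
            | rfl
            | linarith [t1, t2, t3, t4, t5, t6, t7]
        · have hor1 : ¬(x = 1000000000 ∨ x = 1000000) := by tauto
          have hor2 : ¬(x = 1000000000 ∨ x = 1000000 ∨ x = 1000) := by tauto
          have hor3 : ¬(x = 1000 ∨ x = 1000000 ∨ x = 1000000000) := by tauto
          simp only [if_neg h9, if_neg h6, if_neg h3, if_neg hor1, if_neg hor2, if_neg hor3]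
          norm_num
          and_intros <;> first
            | rfl
            | linarith [t1, t2, t3, t4, t5, t6, t7]

-- ===== VERDICT (by name: the statement is the Claim_ definition above) =====
theorem convert_to_groups_spec : Claim_equal_convert_to_groups := by
  intro nums _
  unfold Spec_convert_to_groups convert_to_groups convert_to_groups_alt
  by_cases h : nums.length = 1
  · simp [h]
  · simp only [if_neg h, main_inv nums]
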